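-- pv_equiv track=rewrite | github.com/aaronpmishkin/experiment_utils | src/experiment_utils/configs.py | leaves_to_roots
-- ===== SOURCE A (Python) =====
-- from collections import defaultdict
--
-- def leaves_to_roots(exp_grid: dict) -> dict:
--     new_grid: dict = defaultdict(
--         lambda: defaultdict(lambda: defaultdict(lambda: defaultdict(dict)))
--     )
--
--     for row in exp_grid.keys():
--         for col in exp_grid[row].keys():
--             for line in exp_grid[row][col].keys():
--                 for repeat in exp_grid[row][col][line].keys():
--                     for variation in exp_grid[row][col][line][repeat].keys():
--                         subdict = new_grid[variation][row][col][line]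
--                         val = exp_grid[row][col][line][repeat][variation]
--                         subdict[repeat] = val
--
--     return new_grid
-- ===== SOURCE B (Python) =====
-- def leaves_to_roots(exp_grid: dict) -> dict:
--     # Pass 1: collect the variation keys in first-traversal order.
--     seen: list = []
--     for cols in exp_grid.values():
--         for lines in cols.values():
--             for reps in lines.values():
--                 for variations in reps.values():
--                     for v in variations:
--                         if v not in seen:
--                             seen.append(v)
--
--     # Pass 2: for one variation, project the whole grid onto it,
--     # pruning branches that do not mention it.
--     def project(v):
--         out: dict = {}
--         for row, cols in exp_grid.items():
--             r: dict = {}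
--             for col, lines in cols.items():
--                 c: dict = {}
--                 for line, reps in lines.items():
--                     l: dict = {}
--                     for rep, variations in reps.items():
--                         if v in variations:
--                             l[rep] = variations[v]
--                     if l:
--                         c[line] = l
--                 if c:
--                     r[col] = c
--             if r:
--                 out[row] = r
--         return out
--
--     return {v: project(v) for v in seen}
-- ===== Notes on version B (the rewrite author's own statement) =====
-- stated objective: alternative
-- what changed: B inverts the nesting by group-by-projection instead of per-leaf insertion: one pass collects the variation keys in first-traversal order, then for each variation it projects the whole grid onto that variation with map/filter-style pruning of empty branches, never maintaining A's shared auto-vivifying accumulator; B returns plain nested dicts, equal (==) to A's defaultdict nesting.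
import Mathlib
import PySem

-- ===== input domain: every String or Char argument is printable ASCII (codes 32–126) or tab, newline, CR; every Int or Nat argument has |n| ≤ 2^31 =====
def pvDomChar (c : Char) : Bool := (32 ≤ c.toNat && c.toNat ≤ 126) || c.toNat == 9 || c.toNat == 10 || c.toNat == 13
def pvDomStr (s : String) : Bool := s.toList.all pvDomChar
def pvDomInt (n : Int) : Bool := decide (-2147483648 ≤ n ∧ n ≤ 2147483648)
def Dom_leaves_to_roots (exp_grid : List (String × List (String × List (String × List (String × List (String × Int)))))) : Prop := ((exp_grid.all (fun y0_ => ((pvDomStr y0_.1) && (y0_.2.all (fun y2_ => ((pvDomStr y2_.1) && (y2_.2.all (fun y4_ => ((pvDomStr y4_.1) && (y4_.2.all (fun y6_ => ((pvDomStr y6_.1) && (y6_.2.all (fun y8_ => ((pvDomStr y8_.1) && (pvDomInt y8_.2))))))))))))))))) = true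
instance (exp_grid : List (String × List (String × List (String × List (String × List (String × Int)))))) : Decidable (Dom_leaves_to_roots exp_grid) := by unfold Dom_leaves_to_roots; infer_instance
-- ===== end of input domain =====

-- B re-nests by group-by-projection (collect variation keys, then project the grid onto each
-- variation, pruning empty branches) instead of A's per-leaf insertion into a shared nested
-- accumulator; same return value, different algorithm (objective: alternative).


-- ===== PORT A =====
-- The defaultdict write 'new_grid[variation][row][col][line][repeat] = val':
-- auto-vivifying levels (getD … [] = the defaultdict default), insert = dict assignment.
def l2rPut (g : List (String × List (String × List (String × List (String × List (String × Int))))))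
    (variation row col line rep : String) (val : Int) :
    List (String × List (String × List (String × List (String × List (String × Int))))) :=
  let d1 := (PySem.Dict.mk g).getD variation []
  let d2 := (PySem.Dict.mk d1).getD row []
  let d3 := (PySem.Dict.mk d2).getD col []
  let subdict := (PySem.Dict.mk d3).getD line []
  let subdict' := ((PySem.Dict.mk subdict).insert rep val).items
  let d3' := ((PySem.Dict.mk d3).insert line subdict').items
  let d2' := ((PySem.Dict.mk d2).insert col d3').items
  let d1' := ((PySem.Dict.mk d1).insert row d2').items
  ((PySem.Dict.mk g).insert variation d1').items

-- A: five nested for-loops over the dict levels, writing each leaf into new_grid.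
def leaves_to_roots (exp_grid : List (String × List (String × List (String × List (String × List (String × Int)))))) : List (String × List (String × List (String × List (String × List (String × Int))))) :=
  exp_grid.foldl (fun g rowp =>
    rowp.2.foldl (fun g colp =>
      colp.2.foldl (fun g linep =>
        linep.2.foldl (fun g repp =>
          repp.2.foldl (fun g varp =>
            l2rPut g varp.1 rowp.1 colp.1 linep.1 repp.1 varp.2) g) g) g) g) []

-- ===== PORT B =====
-- B pass 2 helper: project the grid onto one variation, pruning empty branches.
-- ('if v in variations: l[rep] = variations[v]' is ported as one match on get?,
-- exact since 'v in variations' holds iff get? returns some.)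
def l2rProject (v : String) (exp_grid : List (String × List (String × List (String × List (String × List (String × Int)))))) : List (String × List (String × List (String × List (String × Int)))) :=
  exp_grid.foldl (fun out rowp =>
    let r := rowp.2.foldl (fun r colp =>
      let c := colp.2.foldl (fun c linep =>
        let l := linep.2.foldl (fun l repp =>
          match (PySem.Dict.mk repp.2).get? v with
          | some val => ((PySem.Dict.mk l).insert repp.1 val).items
          | none => l) []
        if l = [] then c else ((PySem.Dict.mk c).insert linep.1 l).items) []
      if c = [] then r else ((PySem.Dict.mk r).insert colp.1 c).items) []
    if r = [] then out else ((PySem.Dict.mk out).insert rowp.1 r).items) []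

-- B: pass 1 collects the variation keys in first-traversal order,
-- then the result is built per variation by projection.
def leaves_to_roots_alt (exp_grid : List (String × List (String × List (String × List (String × List (String × Int)))))) : List (String × List (String × List (String × List (String × List (String × Int))))) :=
  let seen := exp_grid.foldl (fun s rowp =>
    rowp.2.foldl (fun s colp =>
      colp.2.foldl (fun s linep =>
        linep.2.foldl (fun s repp =>
          repp.2.foldl (fun s varp =>
            if varp.1 ∈ s then s else s ++ [varp.1]) s) s) s) s) []
  seen.map (fun v => (v, l2rProject v exp_grid))

-- ===== PRECONDITION & SPEC =====
-- Pre_ says the input really is a nested Python dict: keys are distinct at every nesting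
-- level (the association-list encoding admits duplicate keys, which no dict can carry;
-- it excludes no input the Python function is ever called on).
def Pre_leaves_to_roots (exp_grid : List (String × List (String × List (String × List (String × List (String × Int)))))) : Prop :=
  (exp_grid.map Prod.fst).Nodup ∧ ∀ rowp ∈ exp_grid,
    (rowp.2.map Prod.fst).Nodup ∧ ∀ colp ∈ rowp.2,
      (colp.2.map Prod.fst).Nodup ∧ ∀ linep ∈ colp.2,
        (linep.2.map Prod.fst).Nodup ∧ ∀ repp ∈ linep.2,
          (repp.2.map Prod.fst).Nodup
instance (exp_grid : List (String × List (String × List (String × List (String × List (String × Int)))))) : Decidable (Pre_leaves_to_roots exp_grid) := by unfold Pre_leaves_to_roots; infer_instance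

def pvWitness_leaves_to_roots : (List (String × List (String × List (String × List (String × List (String × Int)))))) :=
  [("row", [("col", [("line", [("0", [("v", 3), ("w", 4)]), ("1", [("v", 5)])])])])]

def Spec_leaves_to_roots (exp_grid : List (String × List (String × List (String × List (String × List (String × Int)))))) (out : List (String × List (String × List (String × List (String × List (String × Int)))))) : Prop := out = leaves_to_roots_alt exp_grid
instance (exp_grid : List (String × List (String × List (String × List (String × List (String × Int)))))) (out : List (String × List (String × List (String × List (String × List (String × Int)))))) : Decidable (Spec_leaves_to_roots exp_grid out) := by
  unfold Spec_leaves_to_roots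
  letI i1 : DecidableEq (List (String × Int)) := inferInstance
  letI i2 : DecidableEq (List (String × List (String × Int))) := inferInstance
  letI i3 : DecidableEq (List (String × List (String × List (String × Int)))) := inferInstance
  letI i4 : DecidableEq (List (String × List (String × List (String × List (String × Int))))) := inferInstance
  infer_instance

-- ===== CLAIM (what is proved, stated in full; the proofs are below) =====
def Claim_equal_leaves_to_roots : Prop := ∀ (exp_grid : List (String × List (String × List (String × List (String × List (String × Int)))))), Dom_leaves_to_roots exp_grid → Pre_leaves_to_roots exp_grid → Spec_leaves_to_roots exp_grid (leaves_to_roots exp_grid)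

-- ===== LEMMAS AND PROOFS =====

-- generic dict facts -----------------------------------------------------------

theorem pvContains_mk_false {b : Type} (g : List (String × b)) (k : String)
    (h : k ∉ g.map Prod.fst) : (PySem.Dict.mk g).contains k = false := by
  rw [PySem.Dict.contains_eq_decide_mem_keys]
  simp only [PySem.Dict.keys, decide_eq_false_iff_not]
  exact h

theorem pvContains_mk_true {b : Type} (g : List (String × b)) (k : String)
    (h : k ∈ g.map Prod.fst) : (PySem.Dict.mk g).contains k = true := by
  rw [PySem.Dict.contains_eq_decide_mem_keys]
  simp only [PySem.Dict.keys, decide_eq_true_eq]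
  exact h

theorem pvInsert_absent {b : Type} (g : List (String × b)) (k : String) (x : b)
    (h : k ∉ g.map Prod.fst) : ((PySem.Dict.mk g).insert k x).items = g ++ [(k, x)] := by
  rw [PySem.Dict.items_insert]
  simp [pvContains_mk_false g k h]

theorem pvGetD_absent {b : Type} (g : List (String × b)) (k : String) (d0 : b)
    (h : k ∉ g.map Prod.fst) : (PySem.Dict.mk g).getD k d0 = d0 :=
  PySem.Dict.getD_of_not_contains _ _ (pvContains_mk_false g k h)

-- upsert: 'd[k] = f(d.get(k, b0))', the shape of every defaultdict write in A
def upsert {b : Type} (g : List (String × b)) (k : String) (b0 : b) (f : b → b) :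
    List (String × b) :=
  ((PySem.Dict.mk g).insert k (f ((PySem.Dict.mk g).getD k b0))).items

def gput {b c : Type} (b0 : b) (step : b → c → b) (g : List (String × b)) (p : String × c) :
    List (String × b) :=
  upsert g p.1 b0 (fun x => step x p.2)

theorem upsert_absent {b : Type} (g : List (String × b)) (k : String) (b0 : b) (f : b → b)
    (h : k ∉ g.map Prod.fst) : upsert g k b0 f = g ++ [(k, f b0)] := by
  unfold upsert
  rw [pvGetD_absent g k b0 h, pvInsert_absent g k (f b0) h]

theorem getD_map_form {b : Type} (ks : List String) (G : String → b) (k : String) (b0 : b)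
    (hnd : ks.Nodup) (hk : k ∈ ks) :
    (PySem.Dict.mk (ks.map (fun k' => (k', G k')))).getD k b0 = G k := by
  refine PySem.Dict.getD_of_mem_items _ ?_ ?_ b0
  · exact List.mem_map_of_mem hk
  · simpa [PySem.Dict.keys, List.map_map, Function.comp_def] using hnd

theorem upsert_map_form {b : Type} (ks : List String) (G : String → b) (k : String) (b0 : b)
    (f : b → b) (hnd : ks.Nodup) (hk : k ∈ ks) :
    upsert (ks.map (fun k' => (k', G k'))) k b0 f
      = ks.map (fun k' => (k', if k' = k then f (G k) else G k')) := by
  unfold upsert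
  rw [getD_map_form ks G k b0 hnd hk, PySem.Dict.items_insert]
  rw [pvContains_mk_true _ k (by simpa [List.map_map, Function.comp] using hk)]
  simp only [if_true, List.map_map]
  apply List.map_congr_left
  intro k' _
  by_cases he : k' = k
  · subst he; simp
  · simp [Function.comp, he]

-- first-occurrence dedup (pass 1 of B) -----------------------------------------

def fdStep (s : List String) (x : String) : List String := if x ∈ s then s else s ++ [x]

def fd (xs : List String) : List String := xs.foldl fdStep []

theorem mem_foldl_fdStep (xs : List String) :
    ∀ (acc : List String) (x : String), x ∈ xs.foldl fdStep acc ↔ x ∈ acc ∨ x ∈ xs := by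
  induction xs with
  | nil => simp
  | cons a t ih =>
    intro acc x
    rw [List.foldl_cons, ih]
    unfold fdStep
    split_ifs with h
    · simp only [List.mem_cons]
      constructor
      · tauto
      · rintro (h1 | h2 | h3)
        · exact Or.inl h1
        · exact Or.inl (h2 ▸ h)
        · exact Or.inr h3
    · simp only [List.mem_append, List.mem_cons]
      tauto

theorem nodup_foldl_fdStep (xs : List String) :
    ∀ acc : List String, acc.Nodup → (xs.foldl fdStep acc).Nodup := by
  induction xs with
  | nil => simpa
  | cons a t ih =>
    intro acc hacc
    rw [List.foldl_cons]
    apply ih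
    unfold fdStep
    split_ifs with h
    · exact hacc
    · rw [List.nodup_append]
      refine ⟨hacc, List.nodup_singleton a, ?_⟩
      intro y hy z hz
      rw [List.mem_singleton] at hz
      subst hz
      exact fun e => h (e ▸ hy)

theorem fd_nodup (xs : List String) : (fd xs).Nodup := nodup_foldl_fdStep xs [] (by simp)

theorem mem_fd (xs : List String) (x : String) : x ∈ fd xs ↔ x ∈ xs := by
  unfold fd; rw [mem_foldl_fdStep]; simp

theorem fd_append_singleton (xs : List String) (k : String) :
    fd (xs ++ [k]) = if k ∈ xs then fd xs else fd xs ++ [k] := by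
  have h1 : fd (xs ++ [k]) = fdStep (fd xs) k := by
    unfold fd
    rw [List.foldl_append, List.foldl_cons, List.foldl_nil]
  rw [h1]
  unfold fdStep
  by_cases h : k ∈ xs
  · rw [if_pos ((mem_fd xs k).2 h), if_pos h]
  · rw [if_neg (fun hc => h ((mem_fd xs k).1 hc)), if_neg h]

-- record selection --------------------------------------------------------------

def sel {c : Type} (k : String) (R : List (String × c)) : List c :=
  R.flatMap (fun p => if p.1 = k then [p.2] else [])

theorem sel_append {c : Type} (k : String) (R S : List (String × c)) :
    sel k (R ++ S) = sel k R ++ sel k S := by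
  simp [sel]

theorem sel_nil_of_not_mem {c : Type} (k : String) (R : List (String × c))
    (h : k ∉ R.map Prod.fst) : sel k R = [] := by
  rw [sel, List.flatMap_eq_nil_iff]
  intro p hp
  have : p.1 ≠ k := fun e => h (e ▸ List.mem_map_of_mem hp)
  simp [this]

theorem sel_singleton_self {c : Type} (a : String × c) : sel a.1 [a] = [a.2] := by
  simp [sel]

theorem sel_singleton_ne {c : Type} (k : String) (a : String × c) (h : a.1 ≠ k) :
    sel k [a] = [] := by simp [sel, h]

-- fold over flatMap (loop shape used to flatten A's nested loops)
theorem foldl_flatMap' {a b c : Type} (l : List a) (f : a → List b) (g : c → b → c) :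
    ∀ i : c, (l.flatMap f).foldl g i = l.foldl (fun acc x => (f x).foldl g acc) i := by
  induction l with
  | nil => intro i; rfl
  | cons x t ih => intro i; rw [List.flatMap_cons, List.foldl_append, List.foldl_cons, ih]

-- THE CORE GROUP-BY FACT: a fold of defaultdict writes over records in ANY order
-- is the first-seen-key group-by of those records.
theorem foldl_gput_eq {b c : Type} (b0 : b) (step : b → c → b) (R : List (String × c)) :
    R.foldl (gput b0 step) []
      = (fd (R.map Prod.fst)).map (fun k => (k, (sel k R).foldl step b0)) := by
  induction R using List.reverseRecOn with
  | nil => simp [fd, sel]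
  | append_singleton R a ih =>
    rw [List.foldl_append, List.foldl_cons, List.foldl_nil, ih, List.map_append,
      List.map_singleton, fd_append_singleton]
    by_cases h : a.1 ∈ R.map Prod.fst
    · rw [if_pos h]
      show upsert _ a.1 b0 (fun x => step x a.2) = _
      rw [upsert_map_form (fd (R.map Prod.fst)) (fun k => (sel k R).foldl step b0) a.1 b0 _
        (fd_nodup _) ((mem_fd _ _).2 h)]
      apply List.map_congr_left
      intro k _
      by_cases he : k = a.1
      · subst he
        simp [sel_append, sel_singleton_self, List.foldl_append]
      · simp only [if_neg he, sel_append, sel_singleton_ne k a (fun e => he e.symm),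
          List.append_nil]
    · rw [if_neg h]
      show upsert _ a.1 b0 (fun x => step x a.2) = _
      rw [upsert_absent _ a.1 b0 _ (by
        simp only [List.map_map, Function.comp]
        intro hc
        exact h ((mem_fd _ _).1 (by simpa using hc)))]
      rw [List.map_append]
      congr 1
      · apply List.map_congr_left
        intro k hk
        have hne : a.1 ≠ k := by
          intro e
          exact h (e ▸ (mem_fd _ _).1 hk)
        rw [sel_append, sel_singleton_ne k a hne, List.append_nil]
      · rw [List.map_singleton, sel_append, sel_nil_of_not_mem a.1 R h,
          sel_singleton_self, List.nil_append, List.foldl_cons, List.foldl_nil]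

-- gput over a constant-key block ------------------------------------------------

theorem gput_const_last {b c : Type} (b0 : b) (step : b → c → b) (G : List (String × b))
    (k : String) (hndG : (G.map Prod.fst).Nodup) (hG : k ∉ G.map Prod.fst) :
    ∀ (cs : List c) (x : b),
      (cs.map (fun v => (k, v))).foldl (gput b0 step) (G ++ [(k, x)])
        = G ++ [(k, cs.foldl step x)] := by
  intro cs
  induction cs with
  | nil => intro x; rfl
  | cons v t ih =>
    intro x
    rw [List.map_cons, List.foldl_cons]
    have h1 : gput b0 step (G ++ [(k, x)]) (k, v) = G ++ [(k, step x v)] := by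
      show upsert (G ++ [(k, x)]) k b0 (fun y => step y v) = _
      unfold upsert
      have hget : (PySem.Dict.mk (G ++ [(k, x)])).getD k b0 = x := by
        refine PySem.Dict.getD_of_mem_items _ (by simp) ?_ b0
        show ((G ++ [(k, x)]).map Prod.fst).Nodup
        rw [List.map_append, List.map_singleton, List.nodup_append]
        refine ⟨hndG, List.nodup_singleton k, ?_⟩
        intro y hy z hz
        rw [List.mem_singleton] at hz
        subst hz
        exact fun e => hG (e ▸ hy)
      rw [hget, PySem.Dict.items_insert, pvContains_mk_true _ k (by simp)]
      simp only [if_true, List.map_append, List.map_singleton]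
      congr 1
      · have hid : ∀ p ∈ G, (if (p.1 == k) = true then (k, step x v) else p) = p := by
          intro p hp
          have : p.1 ≠ k := fun e => hG (e ▸ List.mem_map_of_mem hp)
          simp [this]
        rw [List.map_congr_left hid]
        simp
      · simp
    rw [h1, ih (step x v), List.foldl_cons]

theorem gput_const_block {b c : Type} (b0 : b) (step : b → c → b) (G : List (String × b))
    (k : String) (hndG : (G.map Prod.fst).Nodup) (hG : k ∉ G.map Prod.fst) (cs : List c) :
    (cs.map (fun v => (k, v))).foldl (gput b0 step) G
      = if cs.isEmpty then G else G ++ [(k, cs.foldl step b0)] := by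
  cases cs with
  | nil => rfl
  | cons v t =>
    have h1 : gput b0 step G (k, v) = G ++ [(k, step b0 v)] :=
      upsert_absent G k b0 _ hG
    rw [List.map_cons, List.foldl_cons, h1, gput_const_last b0 step G k hndG hG t (step b0 v)]
    simp

-- fold of gputs over a stream of key-blocks with distinct keys -------------------

theorem foldl_gput_blocks {b c s : Type} (b0 : b) (step : b → c → b)
    (blk : String × s → List c) :
    ∀ (L : List (String × s)) (G : List (String × b)),
      (G.map Prod.fst).Nodup →
      (L.map Prod.fst).Nodup → (∀ p ∈ L, p.1 ∉ G.map Prod.fst) →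
      (L.flatMap (fun p => (blk p).map (fun v => (p.1, v)))).foldl (gput b0 step) G
        = G ++ (L.filter (fun p => !(blk p).isEmpty)).map
            (fun p => (p.1, (blk p).foldl step b0)) := by
  intro L
  induction L with
  | nil => intro G _ _ _; simp
  | cons p t ih =>
    intro G hndG hnd hdisj
    have hndG' : ((G ++ [(p.1, (blk p).foldl step b0)]).map Prod.fst).Nodup := by
      rw [List.map_append, List.map_singleton, List.nodup_append]
      refine ⟨hndG, List.nodup_singleton _, ?_⟩
      intro y hy z hz
      rw [List.mem_singleton] at hz
      subst hz
      exact fun e => hdisj p List.mem_cons_self (e ▸ hy)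
    rw [List.flatMap_cons, List.foldl_append,
      gput_const_block b0 step G p.1 hndG (hdisj p List.mem_cons_self) (blk p)]
    have hndt : (t.map Prod.fst).Nodup := (List.nodup_cons.1 (by simpa using hnd)).2
    have hpt : p.1 ∉ t.map Prod.fst := (List.nodup_cons.1 (by simpa using hnd)).1
    by_cases hb : (blk p).isEmpty
    · rw [if_pos hb, ih G hndG hndt (fun q hq => hdisj q (List.mem_cons_of_mem p hq)),
        List.filter_cons]
      simp [hb]
    · rw [if_neg hb, ih (G ++ [(p.1, (blk p).foldl step b0)]) hndG' hndt ?_, List.filter_cons]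
      · simp only [hb, Bool.not_false, if_pos, List.map_cons, List.append_assoc,
          List.singleton_append]
      · intro q hq
        simp only [List.map_append, List.map_singleton, List.mem_append,
          List.mem_singleton]
        rintro (h1 | h2)
        · exact hdisj q (List.mem_cons_of_mem p hq) h1
        · exact hpt (h2 ▸ List.mem_map_of_mem hq)

-- level put functions (A's write, factored per level) ---------------------------

def put5 : List (String × Int) → String × Int → List (String × Int) :=
  gput 0 (fun _ x => x)
def put4 : List (String × List (String × Int)) → String × (String × Int) →
    List (String × List (String × Int)) :=
  gput [] put5
def put3 : List (String × List (String × List (String × Int))) →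
    String × (String × (String × Int)) →
    List (String × List (String × List (String × Int))) :=
  gput [] put4
def put2 : List (String × List (String × List (String × List (String × Int)))) →
    String × (String × (String × (String × Int))) →
    List (String × List (String × List (String × List (String × Int)))) :=
  gput [] put3

-- the leaf-record stream of the grid, in A's traversal order
def R1 (g : List (String × List (String × List (String × List (String × List (String × Int)))))) :
    List (String × (String × (String × (String × (String × Int))))) :=
  g.flatMap (fun rowp => rowp.2.flatMap (fun colp => colp.2.flatMap (fun linep =>
    linep.2.flatMap (fun repp => repp.2.map (fun varp =>
      (varp.1, (rowp.1, (colp.1, (linep.1, (repp.1, varp.2))))))))))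

theorem A_eq (g : List (String × List (String × List (String × List (String × List (String × Int)))))) :
    leaves_to_roots g = (R1 g).foldl (gput [] put2) [] := by
  unfold leaves_to_roots R1
  simp only [foldl_flatMap', List.foldl_map]
  rfl

-- per-variation filtered record blocks and the canonical projected result -------

def blk5 (v : String) (pp : String × List (String × Int)) : List Int :=
  pp.2.flatMap (fun vp => if vp.1 = v then [vp.2] else [])

def blk4 (v : String) (lp : String × List (String × List (String × Int))) :
    List (String × Int) :=
  lp.2.flatMap (fun pp => (blk5 v pp).map (fun x => (pp.1, x)))

def blk3 (v : String) (cp : String × List (String × List (String × List (String × Int)))) :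
    List (String × (String × Int)) :=
  cp.2.flatMap (fun lp => (blk4 v lp).map (fun x => (lp.1, x)))

def blk2 (v : String)
    (rowp : String × List (String × List (String × List (String × List (String × Int))))) :
    List (String × (String × (String × Int))) :=
  rowp.2.flatMap (fun cp => (blk3 v cp).map (fun x => (cp.1, x)))

def canon5 (v : String) (lp : String × List (String × List (String × Int))) :
    List (String × Int) :=
  (lp.2.filter (fun pp => !(blk5 v pp).isEmpty)).map
    (fun pp => (pp.1, (blk5 v pp).foldl (fun _ x => x) 0))

def canon4 (v : String) (cp : String × List (String × List (String × List (String × Int)))) :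
    List (String × List (String × Int)) :=
  (cp.2.filter (fun lp => !(canon5 v lp).isEmpty)).map (fun lp => (lp.1, canon5 v lp))

def canon3 (v : String)
    (rowp : String × List (String × List (String × List (String × List (String × Int))))) :
    List (String × List (String × List (String × Int))) :=
  (rowp.2.filter (fun cp => !(canon4 v cp).isEmpty)).map (fun cp => (cp.1, canon4 v cp))

def canon2 (v : String)
    (g : List (String × List (String × List (String × List (String × List (String × Int)))))) :
    List (String × List (String × List (String × List (String × Int)))) :=
  (g.filter (fun rowp => !(canon3 v rowp).isEmpty)).map (fun rowp => (rowp.1, canon3 v rowp))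

-- emptiness transfers between a block and its canonical build
theorem canon5_nil_iff (v : String) (lp : String × List (String × List (String × Int))) :
    canon5 v lp = [] ↔ blk4 v lp = [] := by
  rw [canon5, blk4, List.map_eq_nil_iff, List.filter_eq_nil_iff, List.flatMap_eq_nil_iff]
  constructor
  · intro h pp hpp
    have h2 := h pp hpp
    simp [List.isEmpty_iff] at h2
    simp [h2]
  · intro h pp hpp
    have h2 := h pp hpp
    simp only [List.map_eq_nil_iff] at h2
    simp [List.isEmpty_iff, h2]

theorem canon5_isEmpty (v : String) (lp : String × List (String × List (String × Int))) :
    (canon5 v lp).isEmpty = (blk4 v lp).isEmpty := by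
  apply Bool.coe_iff_coe.mp
  simp only [List.isEmpty_iff]
  exact canon5_nil_iff v lp

theorem canon4_nil_iff (v : String)
    (cp : String × List (String × List (String × List (String × Int)))) :
    canon4 v cp = [] ↔ blk3 v cp = [] := by
  rw [canon4, blk3, List.map_eq_nil_iff, List.filter_eq_nil_iff, List.flatMap_eq_nil_iff]
  constructor
  · intro h lp hlp
    have h2 := h lp hlp
    simp [List.isEmpty_iff, canon5_nil_iff] at h2
    simp [h2]
  · intro h lp hlp
    have h2 := h lp hlp
    simp only [List.map_eq_nil_iff] at h2
    simp [List.isEmpty_iff, canon5_nil_iff, h2]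

theorem canon4_isEmpty (v : String)
    (cp : String × List (String × List (String × List (String × Int)))) :
    (canon4 v cp).isEmpty = (blk3 v cp).isEmpty := by
  apply Bool.coe_iff_coe.mp
  simp only [List.isEmpty_iff]
  exact canon4_nil_iff v cp

theorem canon3_nil_iff (v : String)
    (rowp : String × List (String × List (String × List (String × List (String × Int))))) :
    canon3 v rowp = [] ↔ blk2 v rowp = [] := by
  rw [canon3, blk2, List.map_eq_nil_iff, List.filter_eq_nil_iff, List.flatMap_eq_nil_iff]
  constructor
  · intro h cp hcp
    have h2 := h cp hcp
    simp [List.isEmpty_iff, canon4_nil_iff] at h2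
    simp [h2]
  · intro h cp hcp
    have h2 := h cp hcp
    simp only [List.map_eq_nil_iff] at h2
    simp [List.isEmpty_iff, canon4_nil_iff, h2]

theorem canon3_isEmpty (v : String)
    (rowp : String × List (String × List (String × List (String × List (String × Int))))) :
    (canon3 v rowp).isEmpty = (blk2 v rowp).isEmpty := by
  apply Bool.coe_iff_coe.mp
  simp only [List.isEmpty_iff]
  exact canon3_nil_iff v rowp

-- A side: the per-variation fold of puts equals the canonical projection --------

theorem foldA5 (v : String) (lp : String × List (String × List (String × Int)))
    (hnd : (lp.2.map Prod.fst).Nodup) :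
    (blk4 v lp).foldl put5 [] = canon5 v lp := by
  unfold blk4 canon5 put5
  rw [foldl_gput_blocks 0 (fun _ x => x) (blk5 v) lp.2 [] (by simp) hnd (by simp)]
  simp

theorem foldA4 (v : String) (cp : String × List (String × List (String × List (String × Int))))
    (hnd : (cp.2.map Prod.fst).Nodup)
    (hin : ∀ lp ∈ cp.2, (lp.2.map Prod.fst).Nodup) :
    (blk3 v cp).foldl put4 [] = canon4 v cp := by
  unfold blk3 canon4 put4
  rw [foldl_gput_blocks [] put5 (blk4 v) cp.2 [] (by simp) hnd (by simp)]
  rw [List.nil_append]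
  have hfc : cp.2.filter (fun lp => !(blk4 v lp).isEmpty)
      = cp.2.filter (fun lp => !(canon5 v lp).isEmpty) :=
    List.filter_congr (fun lp _ => by rw [canon5_isEmpty])
  rw [hfc]
  apply List.map_congr_left
  intro lp hlp
  rw [foldA5 v lp (hin lp (List.mem_of_mem_filter hlp))]

theorem foldA3 (v : String)
    (rowp : String × List (String × List (String × List (String × List (String × Int)))))
    (hnd : (rowp.2.map Prod.fst).Nodup)
    (hin : ∀ cp ∈ rowp.2, (cp.2.map Prod.fst).Nodup ∧
      ∀ lp ∈ cp.2, (lp.2.map Prod.fst).Nodup) :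
    (blk2 v rowp).foldl put3 [] = canon3 v rowp := by
  unfold blk2 canon3 put3
  rw [foldl_gput_blocks [] put4 (blk3 v) rowp.2 [] (by simp) hnd (by simp)]
  rw [List.nil_append]
  have hfc : rowp.2.filter (fun cp => !(blk3 v cp).isEmpty)
      = rowp.2.filter (fun cp => !(canon4 v cp).isEmpty) :=
    List.filter_congr (fun cp _ => by rw [canon4_isEmpty])
  rw [hfc]
  apply List.map_congr_left
  intro cp hcp
  have hm := List.mem_of_mem_filter hcp
  rw [foldA4 v cp (hin cp hm).1 (hin cp hm).2]

theorem sel_R1 (v : String)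
    (g : List (String × List (String × List (String × List (String × List (String × Int)))))) :
    sel v (R1 g) = g.flatMap (fun rowp => (blk2 v rowp).map (fun x => (rowp.1, x))) := by
  unfold sel R1 blk2 blk3 blk4 blk5
  simp only [List.flatMap_assoc, List.map_flatMap, List.flatMap_map, List.map_map,
    Function.comp_def]
  simp [apply_ite]

theorem foldA2 (v : String)
    (g : List (String × List (String × List (String × List (String × List (String × Int))))))
    (pre : Pre_leaves_to_roots g) :
    (sel v (R1 g)).foldl put2 [] = canon2 v g := by
  rw [sel_R1]
  unfold canon2 put2
  rw [foldl_gput_blocks [] put3 (blk2 v) g [] (by simp) pre.1 (by simp)]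
  rw [List.nil_append]
  have hfc : g.filter (fun rowp => !(blk2 v rowp).isEmpty)
      = g.filter (fun rowp => !(canon3 v rowp).isEmpty) :=
    List.filter_congr (fun rowp _ => by rw [canon3_isEmpty])
  rw [hfc]
  apply List.map_congr_left
  intro rowp hrow
  have hm := List.mem_of_mem_filter hrow
  rw [foldA3 v rowp (pre.2 rowp hm).1
    (fun cp hcp => ⟨((pre.2 rowp hm).2 cp hcp).1,
      fun lp hlp => (((pre.2 rowp hm).2 cp hcp).2 lp hlp).1⟩)]

-- B side: the literal projection loops equal the canonical projection -----------

theorem blk5_get? (v : String) :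
    ∀ (l : List (String × Int)), (l.map Prod.fst).Nodup →
      l.flatMap (fun vp => if vp.1 = v then [vp.2] else [])
        = ((PySem.Dict.mk l).get? v).toList := by
  intro l
  induction l with
  | nil => intro _; rfl
  | cons a t ih =>
    intro hnd
    rw [List.flatMap_cons, PySem.Dict.get?_mk_cons]
    have hndt : (t.map Prod.fst).Nodup := (List.nodup_cons.1 (by simpa using hnd)).2
    have hat : a.1 ∉ t.map Prod.fst := (List.nodup_cons.1 (by simpa using hnd)).1
    by_cases he : a.1 = v
    · have ht : t.flatMap (fun vp => if vp.1 = v then [vp.2] else []) = [] := by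
        rw [List.flatMap_eq_nil_iff]
        intro p hp
        have : p.1 ≠ v := fun e => hat (by rw [he, ← e]; exact List.mem_map_of_mem hp)
        simp [this]
      simp [he, ht]
    · have hb : (a.1 == v) = false := by simp [he]
      simp only [he, if_false, List.nil_append, hb, Bool.false_eq_true, ih hndt]

-- leaf loop: 'if v in variations: l[rep] = variations[v]'
theorem foldB5_aux (v : String) :
    ∀ (ps : List (String × List (String × Int))) (G : List (String × Int)),
      (ps.map Prod.fst).Nodup → (∀ pp ∈ ps, (pp.2.map Prod.fst).Nodup) →
      (∀ pp ∈ ps, pp.1 ∉ G.map Prod.fst) →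
      ps.foldl (fun l repp =>
          match (PySem.Dict.mk repp.2).get? v with
          | some val => ((PySem.Dict.mk l).insert repp.1 val).items
          | none => l) G
        = G ++ (ps.filter (fun pp => !(blk5 v pp).isEmpty)).map
            (fun pp => (pp.1, (blk5 v pp).foldl (fun _ x => x) 0)) := by
  intro ps
  induction ps with
  | nil => intro G _ _ _; simp
  | cons pp t ih =>
    intro G hnd hvars hdisj
    have hndt : (t.map Prod.fst).Nodup := (List.nodup_cons.1 (by simpa using hnd)).2
    have hpt : pp.1 ∉ t.map Prod.fst := (List.nodup_cons.1 (by simpa using hnd)).1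
    have hb5 : blk5 v pp = ((PySem.Dict.mk pp.2).get? v).toList :=
      blk5_get? v pp.2 (hvars pp List.mem_cons_self)
    rw [List.foldl_cons, List.filter_cons]
    cases hget : (PySem.Dict.mk pp.2).get? v with
    | none =>
      have hempty : (blk5 v pp).isEmpty = true := by rw [hb5, hget]; rfl
      simp only [hget, hempty, Bool.not_true, Bool.false_eq_true, if_false]
      exact ih G hndt (fun q hq => hvars q (List.mem_cons_of_mem pp hq))
        (fun q hq => hdisj q (List.mem_cons_of_mem pp hq))
    | some val =>
      have hblk : blk5 v pp = [val] := by rw [hb5, hget]; rfl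
      have hins : ((PySem.Dict.mk G).insert pp.1 val).items = G ++ [(pp.1, val)] :=
        pvInsert_absent G pp.1 val (hdisj pp List.mem_cons_self)
      simp only [hget, hins, hblk]
      rw [ih (G ++ [(pp.1, val)]) hndt
        (fun q hq => hvars q (List.mem_cons_of_mem pp hq)) ?_]
      · simp [hblk]
      · intro q hq
        simp only [List.map_append, List.map_singleton, List.mem_append, List.mem_singleton]
        rintro (h1 | h2)
        · exact hdisj q (List.mem_cons_of_mem pp hq) h1
        · exact hpt (h2 ▸ List.mem_map_of_mem hq)

-- guarded insert loop: 'if child: out[key] = child' over distinct keys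
theorem guard_loop {s b : Type} (f : String × s → List b) :
    ∀ (L : List (String × s)) (G : List (String × List b)),
      (L.map Prod.fst).Nodup → (∀ p ∈ L, p.1 ∉ G.map Prod.fst) →
      L.foldl (fun out p =>
          if f p = [] then out else ((PySem.Dict.mk out).insert p.1 (f p)).items) G
        = G ++ (L.filter (fun p => !(f p).isEmpty)).map (fun p => (p.1, f p)) := by
  intro L
  induction L with
  | nil => intro G _ _; simp
  | cons p t ih =>
    intro G hnd hdisj
    have hndt : (t.map Prod.fst).Nodup := (List.nodup_cons.1 (by simpa using hnd)).2
    have hpt : p.1 ∉ t.map Prod.fst := (List.nodup_cons.1 (by simpa using hnd)).1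
    rw [List.foldl_cons, List.filter_cons]
    by_cases hf : f p = []
    · have hemp : (!(f p).isEmpty) = false := by simp [hf]
      simp only [hf, if_pos rfl, hemp, Bool.false_eq_true, if_false]
      exact ih G hndt (fun q hq => hdisj q (List.mem_cons_of_mem p hq))
    · have hins : ((PySem.Dict.mk G).insert p.1 (f p)).items = G ++ [(p.1, f p)] :=
        pvInsert_absent G p.1 (f p) (hdisj p List.mem_cons_self)
      have hne : (!(f p).isEmpty) = true := by simp [List.isEmpty_iff, hf]
      simp only [if_neg hf, hins, hne, if_pos]
      rw [ih (G ++ [(p.1, f p)]) hndt ?_]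
      · simp
      · intro q hq
        simp only [List.map_append, List.map_singleton, List.mem_append, List.mem_singleton]
        rintro (h1 | h2)
        · exact hdisj q (List.mem_cons_of_mem p hq) h1
        · exact hpt (h2 ▸ List.mem_map_of_mem hq)

theorem foldB4 (v : String) (cp : String × List (String × List (String × List (String × Int))))
    (hnd : (cp.2.map Prod.fst).Nodup)
    (hin : ∀ lp ∈ cp.2, (lp.2.map Prod.fst).Nodup ∧
      ∀ pp ∈ lp.2, (pp.2.map Prod.fst).Nodup) :
    cp.2.foldl (fun c linep =>
        let l := linep.2.foldl (fun l repp =>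
          match (PySem.Dict.mk repp.2).get? v with
          | some val => ((PySem.Dict.mk l).insert repp.1 val).items
          | none => l) []
        if l = [] then c else ((PySem.Dict.mk c).insert linep.1 l).items) []
      = canon4 v cp := by
  refine Eq.trans (PySem.List.foldl_congr_mem _ _
    (fun c linep => if canon5 v linep = [] then c
      else ((PySem.Dict.mk c).insert linep.1 (canon5 v linep)).items) _ ?_) ?_
  · intro c linep hlp
    show (let l := linep.2.foldl (fun l repp =>
          match (PySem.Dict.mk repp.2).get? v with
          | some val => ((PySem.Dict.mk l).insert repp.1 val).items
          | none => l) []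
        if l = [] then c else ((PySem.Dict.mk c).insert linep.1 l).items)
      = (if canon5 v linep = [] then c
         else ((PySem.Dict.mk c).insert linep.1 (canon5 v linep)).items)
    have h5 : linep.2.foldl (fun l repp =>
          match (PySem.Dict.mk repp.2).get? v with
          | some val => ((PySem.Dict.mk l).insert repp.1 val).items
          | none => l) [] = canon5 v linep := by
      have := foldB5_aux v linep.2 [] (hin linep hlp).1 (hin linep hlp).2 (by simp)
      simpa [canon5] using this
    simp only [h5]
  · have := guard_loop (fun lp => canon5 v lp) cp.2 [] hnd (by simp)
    simpa [canon4] using this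

theorem foldB3 (v : String)
    (rowp : String × List (String × List (String × List (String × List (String × Int)))))
    (hnd : (rowp.2.map Prod.fst).Nodup)
    (hin : ∀ cp ∈ rowp.2, (cp.2.map Prod.fst).Nodup ∧
      ∀ lp ∈ cp.2, (lp.2.map Prod.fst).Nodup ∧
        ∀ pp ∈ lp.2, (pp.2.map Prod.fst).Nodup) :
    rowp.2.foldl (fun r colp =>
        let c := colp.2.foldl (fun c linep =>
          let l := linep.2.foldl (fun l repp =>
            match (PySem.Dict.mk repp.2).get? v with
            | some val => ((PySem.Dict.mk l).insert repp.1 val).items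
            | none => l) []
          if l = [] then c else ((PySem.Dict.mk c).insert linep.1 l).items) []
        if c = [] then r else ((PySem.Dict.mk r).insert colp.1 c).items) []
      = canon3 v rowp := by
  refine Eq.trans (PySem.List.foldl_congr_mem _ _
    (fun r colp => if canon4 v colp = [] then r
      else ((PySem.Dict.mk r).insert colp.1 (canon4 v colp)).items) _ ?_) ?_
  · intro r colp hcp
    show (let c := colp.2.foldl (fun c linep =>
          let l := linep.2.foldl (fun l repp =>
            match (PySem.Dict.mk repp.2).get? v with
            | some val => ((PySem.Dict.mk l).insert repp.1 val).items
            | none => l) []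
          if l = [] then c else ((PySem.Dict.mk c).insert linep.1 l).items) []
        if c = [] then r else ((PySem.Dict.mk r).insert colp.1 c).items)
      = (if canon4 v colp = [] then r
         else ((PySem.Dict.mk r).insert colp.1 (canon4 v colp)).items)
    have h4 := foldB4 v colp (hin colp hcp).1
      (fun lp hlp => ⟨((hin colp hcp).2 lp hlp).1, ((hin colp hcp).2 lp hlp).2⟩)
    simp only [h4]
  · have := guard_loop (fun cp => canon4 v cp) rowp.2 [] hnd (by simp)
    simpa [canon3] using this

theorem B_project (v : String)
    (g : List (String × List (String × List (String × List (String × List (String × Int))))))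
    (pre : Pre_leaves_to_roots g) :
    l2rProject v g = canon2 v g := by
  unfold l2rProject
  refine Eq.trans (PySem.List.foldl_congr_mem _ _
    (fun out rowp => if canon3 v rowp = [] then out
      else ((PySem.Dict.mk out).insert rowp.1 (canon3 v rowp)).items) _ ?_) ?_
  · intro out rowp hrow
    show (let r := rowp.2.foldl (fun r colp =>
          let c := colp.2.foldl (fun c linep =>
            let l := linep.2.foldl (fun l repp =>
              match (PySem.Dict.mk repp.2).get? v with
              | some val => ((PySem.Dict.mk l).insert repp.1 val).items
              | none => l) []
            if l = [] then c else ((PySem.Dict.mk c).insert linep.1 l).items) []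
          if c = [] then r else ((PySem.Dict.mk r).insert colp.1 c).items) []
        if r = [] then out else ((PySem.Dict.mk out).insert rowp.1 r).items)
      = (if canon3 v rowp = [] then out
         else ((PySem.Dict.mk out).insert rowp.1 (canon3 v rowp)).items)
    have h3 := foldB3 v rowp (pre.2 rowp hrow).1
      (fun cp hcp => ⟨((pre.2 rowp hrow).2 cp hcp).1,
        fun lp hlp => ⟨(((pre.2 rowp hrow).2 cp hcp).2 lp hlp).1,
          (((pre.2 rowp hrow).2 cp hcp).2 lp hlp).2⟩⟩)
    simp only [h3]
  · have := guard_loop (fun rowp => canon3 v rowp) g [] pre.1 (by simp)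
    simpa [canon2] using this

-- pass 1 of B is the first-seen dedup of the record keys ------------------------

theorem seen_eq (g : List (String × List (String × List (String × List (String × List (String × Int)))))) :
    g.foldl (fun s rowp =>
      rowp.2.foldl (fun s colp =>
        colp.2.foldl (fun s linep =>
          linep.2.foldl (fun s repp =>
            repp.2.foldl (fun s varp =>
              if varp.1 ∈ s then s else s ++ [varp.1]) s) s) s) s) []
      = fd ((R1 g).map Prod.fst) := by
  unfold fd R1
  simp only [List.map_flatMap, List.map_map, foldl_flatMap', List.foldl_map]
  rfl

-- ===== VERDICT (by name: the statement is the Claim_ definition above) =====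
theorem leaves_to_roots_spec : Claim_equal_leaves_to_roots := by
  intro g _ pre
  show leaves_to_roots g = leaves_to_roots_alt g
  rw [A_eq, foldl_gput_eq]
  unfold leaves_to_roots_alt
  rw [seen_eq]
  apply List.map_congr_left
  intro v _
  rw [foldA2 v g pre, B_project v g pre]
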